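-- pv_equiv track=rewrite | github.com/bcjarrett/discord | game_tracker/util.py | content_squinch
-- ===== SOURCE A (Python) =====
-- def content_squinch(content, content_list, length=1000):
--     temp_length = 0
--     _slice = 0
--     for n, i in enumerate(content):
--         if len(i) + temp_length < length:
--             _slice += 1
--             temp_length += len(i)
--         else:
--             content_list.append(content[0:_slice])
--             return content_list, content[_slice:]
--     content_list.append(content[0:_slice])
--     return content_list, content[_slice:]
-- ===== SOURCE B (Python) =====
-- def content_squinch(content, content_list, length=1000):
--     # prefix[j] = total length of content[0..j]
--     prefix = []
--     total = 0
--     for s in content: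
--         total += len(s)
--         prefix.append(total)
--     # bisect_left: first index whose cumulative length reaches `length`
--     lo, hi = 0, len(prefix)
--     while lo < hi:
--         mid = (lo + hi) // 2
--         if prefix[mid] < length:
--             lo = mid + 1
--         else:
--             hi = mid
--     content_list.append(content[:lo])
--     return content_list, content[lo:]
-- ===== Notes on version B (the rewrite author's own statement) =====
-- stated objective: alternative
-- what changed: Replaces A's incremental accumulate-and-break scan by an explicit prefix-sum table searched with a hand-written bisect_left binary search for the split index.
import Mathlib
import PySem

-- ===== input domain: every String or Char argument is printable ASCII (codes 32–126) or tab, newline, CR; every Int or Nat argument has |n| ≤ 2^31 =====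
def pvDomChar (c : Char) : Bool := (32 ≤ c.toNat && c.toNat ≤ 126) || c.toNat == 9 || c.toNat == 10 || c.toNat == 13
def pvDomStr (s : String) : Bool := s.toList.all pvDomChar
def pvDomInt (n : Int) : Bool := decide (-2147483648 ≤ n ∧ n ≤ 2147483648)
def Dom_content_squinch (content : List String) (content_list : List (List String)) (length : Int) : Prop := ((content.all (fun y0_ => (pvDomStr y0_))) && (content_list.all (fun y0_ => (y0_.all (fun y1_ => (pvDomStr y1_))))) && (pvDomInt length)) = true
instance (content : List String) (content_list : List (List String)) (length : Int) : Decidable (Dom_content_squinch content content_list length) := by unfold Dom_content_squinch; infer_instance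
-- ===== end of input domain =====

-- B replaces A's incremental accumulate-and-break scan by an explicit prefix-sum table
-- searched with a bisect_left-style binary search (alternative decomposition, same cost).
-- Both A and B append to content_list in place in Python; the theorems are about return values.

-- ===== PORT A =====
-- the for-loop over enumerate(content) with accumulators temp_length and _slice,
-- with the early return inside the else branch
def csLoopA (content : List String) (content_list : List (List String)) (length : Int)
    (rest : List String) (temp slice_ : Int) : List (List String) × List String :=
  match rest with
  | [] =>
      (content_list ++ [PySem.List.slice content (some 0) (some slice_)],
       PySem.List.slice content (some slice_) none)
  | i :: r =>
      if PySem.Str.len i + temp < length then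
        csLoopA content content_list length r (temp + PySem.Str.len i) (slice_ + 1)
      else
        (content_list ++ [PySem.List.slice content (some 0) (some slice_)],
         PySem.List.slice content (some slice_) none)

def content_squinch (content : List String) (content_list : List (List String)) (length : Int) : List (List String) × List String :=
  csLoopA content content_list length content 0 0

-- ===== PORT B =====
-- the prefix-building loop of Source B: carries `total` and emits the running sums
def csAccum (total : Int) (l : List String) : List Int :=
  match l with
  | [] => []
  | s :: r => (total + PySem.Str.len s) :: csAccum (total + PySem.Str.len s) r

-- Source B's while-loop binary search; prefix[mid] is always in range (lo < hi ≤ len),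
-- so getD with default 0 is exact here
def csBisectLeft (pre : List Int) (x : Int) (lo hi : Nat) : Nat :=
  if _h : lo < hi then
    let mid := (lo + hi) / 2
    if pre.getD mid 0 < x then csBisectLeft pre x (mid + 1) hi
    else csBisectLeft pre x lo mid
  else lo
termination_by hi - lo
decreasing_by all_goals omega

def content_squinch_alt (content : List String) (content_list : List (List String)) (length : Int) : List (List String) × List String :=
  let pre := csAccum 0 content
  let idx := csBisectLeft pre length 0 pre.length
  (content_list ++ [PySem.List.slice content (some 0) (some (idx : Int))],
   PySem.List.slice content (some (idx : Int)) none)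

-- ===== PRECONDITION & SPEC =====
def Spec_content_squinch (content : List String) (content_list : List (List String)) (length : Int) (out : List (List String) × List String) : Prop := out = content_squinch_alt content content_list length
instance (content : List String) (content_list : List (List String)) (length : Int) (out : List (List String) × List String) : Decidable (Spec_content_squinch content content_list length out) := by unfold Spec_content_squinch; infer_instance

-- ===== CLAIM (what is proved, stated in full; the proofs are below) =====
def Claim_equal_content_squinch : Prop := ∀ (content : List String) (content_list : List (List String)) (length : Int), Dom_content_squinch content content_list length → Spec_content_squinch content content_list length (content_squinch content content_list length)

-- ===== LEMMAS AND PROOFS =====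

-- abstract split point: number of leading items A's loop consumes
def csTake (rest : List String) (temp length : Int) : Nat :=
  match rest with
  | [] => 0
  | s :: r => if PySem.Str.len s + temp < length then csTake r (temp + PySem.Str.len s) length + 1 else 0

theorem str_len_nonneg (s : String) : 0 ≤ PySem.Str.len s := by
  simp [PySem.Str.len]

theorem csLoopA_eq (content : List String) (content_list : List (List String)) (length : Int) :
    ∀ (rest : List String) (temp : Int) (k : Nat),
      csLoopA content content_list length rest temp (k : Int) =
        (content_list ++ [PySem.List.slice content (some 0) (some ((k + csTake rest temp length : Nat) : Int))],
         PySem.List.slice content (some ((k + csTake rest temp length : Nat) : Int)) none) := by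
  intro rest
  induction rest with
  | nil => intro temp k; simp [csLoopA, csTake]
  | cons s r ih =>
      intro temp k
      simp only [csLoopA, csTake]
      split_ifs with h
      · have := ih (temp + PySem.Str.len s) (k + 1)
        push_cast at this ⊢
        rw [show (k : Int) + 1 = ((k + 1 : Nat) : Int) by push_cast; ring] at this ⊢
        rw [this]
        norm_num
        constructor <;> congr 2 <;> push_cast <;> ring
      · simp

theorem csTake_le_length (length : Int) :
    ∀ (rest : List String) (temp : Int), csTake rest temp length ≤ (csAccum temp rest).length := by
  intro rest
  induction rest with
  | nil => intro temp; simp [csTake, csAccum]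
  | cons s r ih =>
      intro temp
      simp only [csTake, csAccum, List.length_cons]
      split_ifs with h
      · exact Nat.succ_le_succ (ih _)
      · omega

theorem csAccum_getD_ge (length : Int) :
    ∀ (rest : List String) (temp : Int) (j : Nat), j < (csAccum temp rest).length →
      temp ≤ (csAccum temp rest).getD j 0 := by
  intro rest
  induction rest with
  | nil => intro temp j hj; simp [csAccum] at hj
  | cons s r ih =>
      intro temp j hj
      simp only [csAccum, List.length_cons] at hj ⊢
      cases j with
      | zero => have := str_len_nonneg s; simp
      | succ j' =>
          simp only [List.getD_cons_succ]
          have := ih (temp + PySem.Str.len s) j' (by omega)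
          have := str_len_nonneg s
          omega

theorem csTake_lt (length : Int) :
    ∀ (rest : List String) (temp : Int) (j : Nat), j < csTake rest temp length →
      (csAccum temp rest).getD j 0 < length := by
  intro rest
  induction rest with
  | nil => intro temp j hj; simp [csTake] at hj
  | cons s r ih =>
      intro temp j hj
      simp only [csTake] at hj
      split_ifs at hj with h
      · cases j with
        | zero =>
            simp only [csAccum, List.getD_cons_zero]
            simp only [PySem.Str.len] at h ⊢
            omega
        | succ j' =>
            simp only [csAccum, List.getD_cons_succ]
            exact ih _ j' (by omega)
      · omega

theorem csTake_ge (length : Int) :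
    ∀ (rest : List String) (temp : Int) (j : Nat), csTake rest temp length ≤ j →
      j < (csAccum temp rest).length → ¬ (csAccum temp rest).getD j 0 < length := by
  intro rest
  induction rest with
  | nil => intro temp j _ hj; simp [csAccum] at hj
  | cons s r ih =>
      intro temp j hn hj
      simp only [csTake] at hn
      simp only [csAccum, List.length_cons] at hj ⊢
      split_ifs at hn with h
      · cases j with
        | zero => omega
        | succ j' =>
            simp only [List.getD_cons_succ]
            exact ih _ j' (by omega) (by omega)
      · cases j with
        | zero =>
            simp only [List.getD_cons_zero] at *
            simp only [PySem.Str.len] at h ⊢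
            omega
        | succ j' =>
            simp only [List.getD_cons_succ]
            have := csAccum_getD_ge length r (temp + PySem.Str.len s) j' (by omega)
            omega

theorem csBisectLeft_eq (pre : List Int) (x : Int) (n : Nat)
    (hb : ∀ j, j < n → pre.getD j 0 < x)
    (hc : ∀ j, n ≤ j → j < pre.length → ¬ pre.getD j 0 < x) :
    ∀ (k lo hi : Nat), hi - lo ≤ k → lo ≤ n → n ≤ hi → hi ≤ pre.length →
      csBisectLeft pre x lo hi = n := by
  intro k
  induction k with
  | zero =>
      intro lo hi hk h1 h2 h3
      rw [csBisectLeft]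
      simp only [dif_neg (by omega : ¬ lo < hi)]
      omega
  | succ k ih =>
      intro lo hi hk h1 h2 h3
      rw [csBisectLeft]
      by_cases hlt : lo < hi
      · simp only [dif_pos hlt]
        by_cases hm : pre.getD ((lo + hi) / 2) 0 < x
        · simp only [if_pos hm]
          have hmn : (lo + hi) / 2 < n := by
            by_contra hcon
            exact hc _ (by omega) (by omega) hm
          exact ih ((lo + hi) / 2 + 1) hi (by omega) (by omega) h2 h3
        · simp only [if_neg hm]
          have hmn : n ≤ (lo + hi) / 2 := by
            by_contra hcon
            exact hm (hb _ (by omega))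
          exact ih lo ((lo + hi) / 2) (by omega) h1 hmn (by omega)
      · simp only [dif_neg hlt]; omega

-- ===== VERDICT (by name: the statement is the Claim_ definition above) =====
theorem content_squinch_spec : Claim_equal_content_squinch := by
  intro content content_list length _
  unfold Spec_content_squinch content_squinch content_squinch_alt
  have hA := csLoopA_eq content content_list length content 0 0
  have hn := csTake_le_length length content 0
  have hB := csBisectLeft_eq (csAccum 0 content) length (csTake content 0 length)
    (csTake_lt length content 0) (csTake_ge length content 0)
    (csAccum 0 content).length 0 (csAccum 0 content).length (by omega) (by omega) hn le_rfl
  simp only [Nat.cast_zero] at hA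
  rw [hA]
  simp [hB]
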